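-- pv_equiv track=rewrite | github.com/rymarmary/compEGE | search_for_divisors(task_25)/25_9.py | prime2
-- ===== SOURCE A (Python) =====
-- def isprime(n):
--     d = 2
--     while d * d <= n:
--         if n % d == 0:
--             return False
--         d += 1
--     return True
--
-- def prime2(n, k):
--     d = 2
--     while d * d < n:
--         if n % d == 0 and d != k and (n // d) != k:
--             if isprime(d):
--                 if isprime(n // d):
--                     return True
--         d += 1
--     return False
-- ===== SOURCE B (Python) =====
-- def prime2(n, k):
--     # Factor n completely by trial division, then inspect the factorization:
--     # n qualifies iff it has exactly two prime factors, they are distinct,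
--     # and neither equals k.
--     factors = []
--     m = n
--     d = 2
--     while d * d <= m:
--         while m % d == 0:
--             factors.append(d)
--             m //= d
--         d += 1
--     if m > 1:
--         factors.append(m)
--     return len(factors) == 2 and factors[0] != factors[1] and k not in factors
-- ===== Notes on version B (the rewrite author's own statement) =====
-- stated objective: alternative
-- what changed: B factors n completely by trial division into a list of prime factors and then just inspects that list (exactly two factors, distinct, neither equal to k), instead of A's scan over every candidate divisor below sqrt(n) with a nested primality test on both halves at each divisor.
import Mathlib
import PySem

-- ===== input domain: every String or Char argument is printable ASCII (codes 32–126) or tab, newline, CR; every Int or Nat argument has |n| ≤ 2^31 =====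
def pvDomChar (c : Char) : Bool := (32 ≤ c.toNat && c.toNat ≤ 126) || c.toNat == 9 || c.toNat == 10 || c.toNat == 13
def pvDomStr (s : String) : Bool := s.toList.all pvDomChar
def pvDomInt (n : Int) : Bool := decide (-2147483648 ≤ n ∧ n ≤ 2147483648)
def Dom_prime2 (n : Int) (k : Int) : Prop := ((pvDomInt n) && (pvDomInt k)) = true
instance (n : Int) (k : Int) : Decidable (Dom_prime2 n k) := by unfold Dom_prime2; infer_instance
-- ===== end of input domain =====

-- B factors n completely by trial division and inspects the factorization (exactly two
-- distinct prime factors, neither equal to k), instead of A's scan over candidate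
-- divisors with nested primality tests on both halves; alternative algorithm, same cost.
-- Loops are transliterated with a fuel counter large enough to never run out (a totality guard only).

-- ===== PORT A =====
def isprimeLoop (fuel : Nat) (m : Int) (d : Int) : Bool :=
  match fuel with
  | 0 => true
  | fuel + 1 =>
    if d * d ≤ m then
      if PySem.Int.mod m d == 0 then false
      else isprimeLoop fuel m (d + 1)
    else true

def isprime (m : Int) : Bool := isprimeLoop (m + 1).toNat m 2

def prime2Loop (fuel : Nat) (n : Int) (k : Int) (d : Int) : Bool :=
  match fuel with
  | 0 => false
  | fuel + 1 =>
    if d * d < n then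
      if PySem.Int.mod n d == 0 && !(d == k) && !(PySem.Int.floordiv n d == k)
          && isprime d && isprime (PySem.Int.floordiv n d) then true
      else prime2Loop fuel n k (d + 1)
    else false

def prime2 (n : Int) (k : Int) : Bool := prime2Loop (n + 1).toNat n k 2

-- ===== PORT B =====
-- the nested whiles of Source B as one fueled recursion over the same state (factors, m, d):
-- a step either divides out d (inner while body) or advances d (outer step)
def factLoop (fuel : Nat) (m : Int) (d : Int) (acc : List Int) : List Int :=
  match fuel with
  | 0 => acc
  | fuel + 1 =>
    if d * d ≤ m then
      if PySem.Int.mod m d == 0 then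
        factLoop fuel (PySem.Int.floordiv m d) d (acc ++ [d])
      else factLoop fuel m (d + 1) acc
    else if 1 < m then acc ++ [m] else acc

def prime2_alt (n : Int) (k : Int) : Bool :=
  match factLoop (n + 1).toNat n 2 [] with
  | [a, b] => !(a == b) && !(a == k) && !(b == k)
  | _ => false

-- ===== PRECONDITION & SPEC =====
def Spec_prime2 (n : Int) (k : Int) (out : Bool) : Prop := out = prime2_alt n k
instance (n : Int) (k : Int) (out : Bool) : Decidable (Spec_prime2 n k out) := by unfold Spec_prime2; infer_instance

-- ===== CLAIM (what is proved, stated in full; the proofs are below) =====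
def Claim_equal_prime2 : Prop := ∀ (n : Int) (k : Int), Dom_prime2 n k → Spec_prime2 n k (prime2 n k)

-- ===== LEMMAS AND PROOFS =====

theorem isprimeLoop_iff (fuel : Nat) (m d : Int) (hd : 0 ≤ d) (hfuel : m + 1 - d < (fuel : Int)) :
    isprimeLoop fuel m d = true ↔ ∀ e : Int, d ≤ e → e * e ≤ m → ¬ (e ∣ m) := by
  induction fuel generalizing d with
  | zero =>
    simp only [isprimeLoop, true_iff]
    push_cast at hfuel
    intro e he hee hdvd
    nlinarith [mul_self_nonneg (e - 1)]
  | succ fuel ih =>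
    simp only [isprimeLoop]
    split_ifs with h1 h2
    · simp only [false_iff]
      intro H
      exact H d le_rfl h1 ((PySem.Int.mod_eq_zero_iff_dvd m d).mp (by simpa using h2))
    · rw [ih (d + 1) (by omega) (by push_cast at hfuel ⊢; omega)]
      constructor
      · intro H e he hee
        rcases eq_or_lt_of_le he with rfl | hlt
        · exact fun hdvd => h2 (by simpa using (PySem.Int.mod_eq_zero_iff_dvd m _).mpr hdvd)
        · exact H e (by omega) hee
      · intro H e he hee
        exact H e (by omega) hee
    · simp only [true_iff]
      intro e he hee hdvd
      exact h1 (by nlinarith)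

theorem isprime_iff (m : Int) :
    isprime m = true ↔ ∀ e : Int, 2 ≤ e → e * e ≤ m → ¬ (e ∣ m) := by
  exact isprimeLoop_iff (m + 1).toNat m 2 (by omega) (by omega)

def G (n k e : Int) : Prop :=
  e ∣ n ∧ e ≠ k ∧ n / e ≠ k ∧ isprime e = true ∧ isprime (n / e) = true

theorem cond_iff (n k d : Int) (hd : 0 < d) :
    (PySem.Int.mod n d == 0 && !(d == k) && !(PySem.Int.floordiv n d == k)
        && isprime d && isprime (PySem.Int.floordiv n d)) = true ↔ G n k d := by
  rw [PySem.Int.floordiv_eq_ediv_of_pos hd]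
  simp only [Bool.and_eq_true, beq_iff_eq, Bool.not_eq_eq_eq_not, Bool.not_true,
    beq_eq_false_iff_ne, ne_eq, G, ← PySem.Int.mod_eq_zero_iff_dvd]
  tauto

theorem prime2Loop_iff (fuel : Nat) (n k d : Int) (hd : 2 ≤ d) (hfuel : n + 1 - d < (fuel : Int)) :
    prime2Loop fuel n k d = true ↔ ∃ e : Int, d ≤ e ∧ e * e < n ∧ G n k e := by
  induction fuel generalizing d with
  | zero =>
    simp only [prime2Loop, Bool.false_eq_true, false_iff]
    push_cast at hfuel
    rintro ⟨e, he, hee, -⟩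
    nlinarith [mul_self_nonneg (e - 1)]
  | succ fuel ih =>
    simp only [prime2Loop]
    split_ifs with h1 h2
    · simp only [true_iff]
      exact ⟨d, le_rfl, h1, (cond_iff n k d (by omega)).mp h2⟩
    · rw [ih (d + 1) (by omega) (by push_cast at hfuel ⊢; omega)]
      constructor
      · rintro ⟨e, he, hee, hG⟩
        exact ⟨e, by omega, hee, hG⟩
      · rintro ⟨e, he, hee, hG⟩
        rcases eq_or_lt_of_le he with rfl | h'
        · exact absurd ((cond_iff n k _ (by omega)).mpr hG) h2
        · exact ⟨e, by omega, hee, hG⟩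
    · simp only [false_iff]
      rintro ⟨e, he, hee, -⟩
      exact h1 (by nlinarith)

theorem prime_of_isprime (m : Int) (h2 : 2 ≤ m) (h : isprime m = true) : Prime m := by
  rw [Int.prime_iff_natAbs_prime]
  rw [Nat.prime_def_lt']
  have hchar := (isprime_iff m).mp h
  refine ⟨by omega, ?_⟩
  intro F hF hFM hdvd
  obtain ⟨Q, hQ⟩ := hdvd
  have hM : (m.natAbs : Int) = m := by omega
  have hQ2 : 2 ≤ Q := by nlinarith
  by_cases hle : F ≤ Q
  · refine hchar (F : Int) (by exact_mod_cast hF) ?_ ?_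
    · have : F * F ≤ m.natAbs := by nlinarith
      have := (Nat.cast_le (α := Int)).mpr this
      push_cast at this; omega
    · rw [← hM]; exact_mod_cast Dvd.intro Q hQ.symm
  · refine hchar (Q : Int) (by exact_mod_cast hQ2) ?_ ?_
    · have : Q * Q ≤ m.natAbs := by nlinarith
      have := (Nat.cast_le (α := Int)).mpr this
      push_cast at this; omega
    · rw [← hM]; exact_mod_cast Dvd.intro_left F hQ.symm

theorem isprime_of_prime (p : Int) (h2 : 2 ≤ p) (hp : Prime p) : isprime p = true := by
  rw [isprime_iff]
  intro e he hee hdvd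
  have hnat : p.natAbs.Prime := Int.prime_iff_natAbs_prime.mp hp
  have hd : e.natAbs ∣ p.natAbs := Int.natAbs_dvd_natAbs.mpr hdvd
  have := hnat.eq_one_or_self_of_dvd e.natAbs hd
  have : e = p := by omega
  nlinarith

theorem prime_dvd_prime_eq (a b : Int) (ha : Prime a) (hb : Prime b)
    (ha2 : 2 ≤ a) (hb2 : 2 ≤ b) (hdvd : a ∣ b) : a = b := by
  have hnb : b.natAbs.Prime := Int.prime_iff_natAbs_prime.mp hb
  have hd : a.natAbs ∣ b.natAbs := Int.natAbs_dvd_natAbs.mpr hdvd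
  have := hnb.eq_one_or_self_of_dvd a.natAbs hd
  omega

theorem prime_dvd_semiprime (a e q : Int) (ha : Prime a) (he : Prime e) (hq : Prime q)
    (ha2 : 2 ≤ a) (he2 : 2 ≤ e) (hq2 : 2 ≤ q) (hdvd : a ∣ e * q) : a = e ∨ a = q := by
  rcases (ha.dvd_mul).mp hdvd with h | h
  · exact Or.inl (prime_dvd_prime_eq a e ha he ha2 he2 h)
  · exact Or.inr (prime_dvd_prime_eq a q ha hq ha2 hq2 h)

theorem prod_ge_one (L : List Int) (h : ∀ x ∈ L, 2 ≤ x) : 1 ≤ L.prod := by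
  induction L with
  | nil => simp
  | cons a t ih =>
    have ha := h a (List.mem_cons_self ..)
    have ht := ih (fun x hx => h x (List.mem_cons_of_mem _ hx))
    simp only [List.prod_cons]
    nlinarith

-- a sorted list of (positive) primes with product e*q, e < q both prime, must be [e, q]
theorem semiprime_list (L : List Int) (hAll : ∀ x ∈ L, Prime x ∧ 2 ≤ x)
    (hS : L.Sorted (· ≤ ·)) (e q : Int) (hProd : L.prod = e * q)
    (he : Prime e) (hq : Prime q) (he2 : 2 ≤ e) (hlt : e < q) : L = [e, q] := by
  have hq2 : 2 ≤ q := by omega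
  match L, hAll, hS, hProd with
  | [], hAll, hS, hProd =>
    simp only [List.prod_nil] at hProd
    nlinarith
  | [a], hAll, hS, hProd =>
    obtain ⟨hap, ha2⟩ := hAll a (by simp)
    simp only [List.prod_cons, List.prod_nil, mul_one] at hProd
    have hda : e ∣ a := ⟨q, hProd⟩
    have hea : e = a := prime_dvd_prime_eq e a he hap he2 ha2 hda
    rw [← hea] at hProd
    have : (1 : Int) = q := mul_left_cancel₀ (show e ≠ 0 by omega) (by omega)
    omega
  | [a, b], hAll, hS, hProd =>
    obtain ⟨hap, ha2⟩ := hAll a (by simp)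
    obtain ⟨hbp, hb2⟩ := hAll b (by simp)
    have hab : a ≤ b := by
      rcases List.pairwise_cons.mp hS with ⟨h1, -⟩
      exact h1 b (by simp)
    simp only [List.prod_cons, List.prod_nil, mul_one] at hProd
    have hda : a ∣ e * q := ⟨b, hProd.symm⟩
    rcases prime_dvd_semiprime a e q hap he hq ha2 he2 hq2 hda with hae | haq
    · rw [hae] at hProd
      have : b = q := mul_left_cancel₀ (show e ≠ 0 by omega) hProd
      rw [hae, this]
    · rw [haq] at hProd
      have : b = e := mul_left_cancel₀ (show q ≠ 0 by omega) (by rw [hProd]; ring)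
      omega
  | a :: b :: c :: t, hAll, hS, hProd =>
    obtain ⟨hap, ha2⟩ := hAll a (by simp)
    obtain ⟨hbp, hb2⟩ := hAll b (by simp)
    have hc2 : 2 ≤ c := (hAll c (by simp)).2
    have ht1 : 1 ≤ t.prod := prod_ge_one _ (fun x hx => (hAll x (by simp [hx])).2)
    have hP2 : 2 ≤ (c :: t).prod := by
      simp only [List.prod_cons]; nlinarith
    rw [List.prod_cons, List.prod_cons] at hProd
    -- hProd : a * (b * (c :: t).prod) = e * q
    have hda : a ∣ e * q := ⟨b * (c :: t).prod, hProd.symm⟩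
    rcases prime_dvd_semiprime a e q hap he hq ha2 he2 hq2 hda with hae | haq
    · rw [hae] at hProd
      have h1 : b * (c :: t).prod = q := mul_left_cancel₀ (show e ≠ 0 by omega) hProd
      have hdb : b ∣ q := ⟨(c :: t).prod, h1.symm⟩
      have hbq : b = q := prime_dvd_prime_eq b q hbp hq hb2 hq2 hdb
      rw [hbq] at h1
      have : (c :: t).prod = 1 := mul_left_cancel₀ (show q ≠ 0 by omega) (by rw [h1]; ring)
      omega
    · rw [haq] at hProd
      have h1 : b * (c :: t).prod = e :=
        mul_left_cancel₀ (show q ≠ 0 by omega) (by rw [hProd]; ring)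
      have hdb : b ∣ e := ⟨(c :: t).prod, h1.symm⟩
      have hbe : b = e := prime_dvd_prime_eq b e hbp he hb2 he2 hdb
      rw [hbe] at h1
      have : (c :: t).prod = 1 :=
        mul_left_cancel₀ (show e ≠ 0 by omega) (by rw [mul_one]; exact h1)
      omega

theorem factLoop_trivial (fuel : Nat) (m d : Int) (acc : List Int)
    (hd : 2 ≤ d) (hm : m ≤ 0) : factLoop fuel m d acc = acc := by
  cases fuel with
  | zero => rfl
  | succ fuel =>
    simp only [factLoop]
    rw [if_neg (by nlinarith), if_neg (by omega)]

theorem factLoop_spec (fuel : Nat) (m d : Int) (acc : List Int)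
    (hd : 2 ≤ d) (hm : 1 ≤ m)
    (hmin : ∀ f : Int, 2 ≤ f → f < d → ¬ f ∣ m)
    (hfuel : m + 1 - d < (fuel : Int)) :
    ∃ L : List Int, factLoop fuel m d acc = acc ++ L ∧ L.prod = m ∧
      (∀ x ∈ L, Prime x ∧ d ≤ x) ∧ L.Sorted (· ≤ ·) := by
  induction fuel generalizing m d acc with
  | zero =>
    push_cast at hfuel
    have hm1 : m = 1 := by
      by_contra h
      exact hmin m (by omega) (by omega) dvd_rfl
    exact ⟨[], by simp [factLoop], by simp [hm1], by simp, List.Pairwise.nil⟩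
  | succ fuel ih =>
    simp only [factLoop]
    split_ifs with h1 h2 h3
    · -- d divides m: divide out
      have hdvd : d ∣ m := (PySem.Int.mod_eq_zero_iff_dvd m d).mp (by simpa using h2)
      rw [PySem.Int.floordiv_eq_ediv_of_pos (by omega)]
      have hmul : d * (m / d) = m := Int.mul_ediv_cancel' hdvd
      have hm' : d ≤ m / d := by nlinarith
      have hlt : m / d < m := by nlinarith
      have hmin' : ∀ f : Int, 2 ≤ f → f < d → ¬ f ∣ (m / d) := by
        intro f hf hfd hfdvd
        have hdm : m / d ∣ m := ⟨d, by rw [mul_comm]; exact hmul.symm⟩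
        exact hmin f hf hfd (hfdvd.trans hdm)
      obtain ⟨L', hEq, hProd, hElem, hSort⟩ :=
        ih (m / d) d (acc ++ [d]) hd (by omega) hmin' (by push_cast at hfuel ⊢; omega)
      refine ⟨d :: L', by rw [hEq]; simp, by simp only [List.prod_cons, hProd, hmul], ?_, ?_⟩
      · have hdp : Prime d := by
          refine prime_of_isprime d hd ((isprime_iff d).mpr ?_)
          intro e he hee hedvd
          exact hmin e he (by nlinarith) (hedvd.trans hdvd)
        intro x hx
        rcases List.mem_cons.mp hx with rfl | hx'
        · exact ⟨hdp, le_rfl⟩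
        · exact ⟨(hElem x hx').1, (hElem x hx').2⟩
      · exact List.pairwise_cons.mpr ⟨fun b hb => (hElem b hb).2, hSort⟩
    · -- d does not divide m: advance d
      have hnd : ¬ d ∣ m := fun hdvd =>
        h2 (by simpa using (PySem.Int.mod_eq_zero_iff_dvd m d).mpr hdvd)
      have hmin' : ∀ f : Int, 2 ≤ f → f < d + 1 → ¬ f ∣ m := by
        intro f hf hfd
        rcases eq_or_lt_of_le (show f ≤ d by omega) with rfl | h'
        · exact hnd
        · exact hmin f hf (by omega)
      obtain ⟨L', hEq, hProd, hElem, hSort⟩ :=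
        ih m (d + 1) acc (by omega) hm hmin' (by push_cast at hfuel ⊢; omega)
      exact ⟨L', hEq, hProd, fun x hx => ⟨(hElem x hx).1, by have := (hElem x hx).2; omega⟩, hSort⟩
    · -- loop ends, m > 1: append the remaining prime
      have hdm : d ≤ m := by
        by_contra h
        exact hmin m (by omega) (by omega) dvd_rfl
      have hmp : Prime m := by
        refine prime_of_isprime m (by omega) ((isprime_iff m).mpr ?_)
        intro e he hee
        exact hmin e he (by nlinarith)
      exact ⟨[m], rfl, by simp, fun x hx => by simp at hx; exact ⟨hx ▸ hmp, hx ▸ hdm⟩, List.pairwise_singleton _ _⟩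
    · -- loop ends, m = 1
      exact ⟨[], by simp, by simp; omega, by simp, List.Pairwise.nil⟩

theorem main_equiv (n k : Int) : prime2 n k = prime2_alt n k := by
  by_cases hn : 1 ≤ n
  · -- positive n: compare via the factorization characterization
    have htn : (((n + 1).toNat : Nat) : Int) = n + 1 := Int.toNat_of_nonneg (by omega)
    obtain ⟨L, hEq, hProd, hElem, hSort⟩ :=
      factLoop_spec (n + 1).toNat n 2 [] le_rfl hn (fun f hf hfd => by omega) (by omega)
    rw [Bool.eq_iff_iff, prime2,
      prime2Loop_iff (n + 1).toNat n k 2 le_rfl (by omega)]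
    rw [prime2_alt, hEq, List.nil_append]
    constructor
    · rintro ⟨e, he2, hee, hedvd, hek, hqk, hpe, hpq⟩
      have hmul : n / e * e = n := Int.ediv_mul_cancel hedvd
      have hq2 : e < n / e := lt_of_mul_lt_mul_right (by rw [hmul]; exact hee) (by omega)
      have hPe : Prime e := prime_of_isprime e he2 hpe
      have hPq : Prime (n / e) := prime_of_isprime (n / e) (by omega) hpq
      have hL : L = [e, n / e] :=
        semiprime_list L (fun x hx => ⟨(hElem x hx).1, (hElem x hx).2⟩) hSort e (n / e)
          (by rw [hProd]; rw [mul_comm] at hmul; exact hmul.symm) hPe hPq he2 hq2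
      rw [hL]
      simp only [Bool.and_eq_true, Bool.not_eq_eq_eq_not, Bool.not_true, beq_eq_false_iff_ne,
        ne_eq]
      exact ⟨⟨by omega, hek⟩, hqk⟩
    · intro h
      match L, h, hProd, hElem, hSort with
      | [], h, hProd, hElem, hSort => simp at h
      | [a], h, hProd, hElem, hSort => simp at h
      | a :: b :: c :: t, h, hProd, hElem, hSort => simp at h
      | [a, b], h, hProd, hElem, hSort =>
        simp only [Bool.and_eq_true, Bool.not_eq_eq_eq_not, Bool.not_true,
          beq_eq_false_iff_ne, ne_eq] at h
        obtain ⟨⟨hab, hak⟩, hbk⟩ := h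
        obtain ⟨hap, ha2⟩ := hElem a (by simp)
        obtain ⟨hbp, hb2⟩ := hElem b (by simp)
        have habd : a ≤ b := by
          rcases List.pairwise_cons.mp hSort with ⟨h1, -⟩
          exact h1 b (by simp)
        have hprod : a * b = n := by simpa using hProd
        have hdiv : n / a = b := by rw [← hprod, Int.mul_ediv_cancel_left _ (by omega)]
        refine ⟨a, ha2, ?_, ⟨b, hprod.symm⟩, hak, hdiv ▸ hbk,
          isprime_of_prime a ha2 hap, hdiv ▸ isprime_of_prime b hb2 hbp⟩
        nlinarith [lt_of_le_of_ne habd hab]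
  · -- n ≤ 0: both sides are false
    have hA : prime2 n k = false := by
      rw [← Bool.not_eq_true, prime2,
        prime2Loop_iff (n + 1).toNat n k 2 le_rfl (by omega)]
      rintro ⟨e, he, hee, -⟩
      nlinarith
    rw [hA, prime2_alt, factLoop_trivial _ _ _ _ le_rfl (by omega)]

-- ===== VERDICT (by name: the statement is the Claim_ definition above) =====
theorem prime2_spec : Claim_equal_prime2 := by
  intro n k _
  unfold Spec_prime2
  exact main_equiv n k
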